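-- pv_equiv track=rewrite | github.com/kred03/353505_DANILAU_8 | IGI/LR3/task4.py | find_balanced_words
-- ===== SOURCE A (Python) =====
-- def find_balanced_words(words):
--     """
--     Find words where the number of vowels equals the number of consonants.
--     :param words: A list of words.
--     :return: A list of tuples containing the word and its index.
--     """
--     vowels = "aeiou"
--     balanced_words = []
--     for index, word in enumerate(words):
--         vowel_count = 0
--         consonant_count = 0
--         for char in word.lower():
--             if char in vowels:
--                 vowel_count += 1
--             elif char.isalpha():
--                 consonant_count += 1
--         if vowel_count == consonant_count:
--             balanced_words.append((word, index + 1))  # +1 to make index human-readable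
--     return balanced_words
-- ===== SOURCE B (Python) =====
-- def find_balanced_words(words):
--     """
--     Find words where the number of vowels equals the number of consonants.
--     :param words: A list of words.
--     :return: A list of tuples containing the word and its index.
--     """
--     balanced_words = []
--     for index, word in enumerate(words):
--         freq = {}
--         for char in word.lower():
--             freq[char] = freq.get(char, 0) + 1
--         vowel_total = sum(freq.get(v, 0) for v in "aeiou")
--         letter_total = sum(n for ch, n in freq.items() if ch.isalpha())
--         if 2 * vowel_total == letter_total:
--             balanced_words.append((word, index + 1))
--     return balanced_words
-- ===== Notes on version B (the rewrite author's own statement) =====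
-- stated objective: alternative
-- what changed: Instead of classifying each character into two running vowel/consonant counters, B builds a per-word character-frequency dictionary once and then aggregates it: vowel total by looking up the five vowels, letter total by summing the counts of the alphabetic keys, testing 2*vowels == letters.
import Mathlib
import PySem

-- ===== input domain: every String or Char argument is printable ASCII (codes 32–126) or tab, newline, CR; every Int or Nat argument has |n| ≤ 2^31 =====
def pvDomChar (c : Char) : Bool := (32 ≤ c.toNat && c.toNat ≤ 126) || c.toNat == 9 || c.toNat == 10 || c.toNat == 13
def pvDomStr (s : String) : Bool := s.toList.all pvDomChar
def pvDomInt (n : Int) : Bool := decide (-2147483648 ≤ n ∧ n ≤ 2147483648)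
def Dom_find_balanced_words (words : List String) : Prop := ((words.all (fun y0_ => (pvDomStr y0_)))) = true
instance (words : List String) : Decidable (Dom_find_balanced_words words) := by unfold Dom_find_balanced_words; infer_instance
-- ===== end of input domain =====

-- B replaces A's per-character two-counter classification by building a frequency
-- dictionary of the lowered word once and then aggregating it: vowel total by looking
-- up the five vowels, letter total by summing the counts of the alphabetic keys
-- (objective: alternative decomposition, same cost).

-- shared literal helper: Python's `char in "aeiou"` / the vowel string both programs use
def pvIsVowel (c : Char) : Bool := c ∈ ['a', 'e', 'i', 'o', 'u']

-- ===== PORT A =====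
-- inner loop of A: two counters (vowel_count, consonant_count) over word.lower()
def pvCountsA (cs : List Char) : Int × Int :=
  cs.foldl (fun vc c =>
    if pvIsVowel c then (vc.1 + 1, vc.2)
    else if PySem.Chars.isalpha c then (vc.1, vc.2 + 1)
    else vc) (0, 0)

def find_balanced_words (words : List String) : List (String × Int) :=
  (PySem.List.enumerate words).foldl (fun acc p =>
    let vc := pvCountsA (PySem.Chars.lower p.2.toList)
    if vc.1 = vc.2 then acc ++ [(p.2, p.1 + 1)] else acc) []

-- ===== PORT B =====
-- freq = {}; for char in word.lower(): freq[char] = freq.get(char, 0) + 1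
def pvFreqB (cs : List Char) : PySem.Dict Char Int :=
  cs.foldl (fun d c => d.insert c (d.getD c 0 + 1)) PySem.Dict.empty

-- sum(freq.get(v, 0) for v in "aeiou")
def pvVowelTotalB (freq : PySem.Dict Char Int) : Int :=
  (['a', 'e', 'i', 'o', 'u'].map (fun v => freq.getD v 0)).sum

-- sum(n for ch, n in freq.items() if ch.isalpha())
def pvLetterTotalB (freq : PySem.Dict Char Int) : Int :=
  ((freq.items.filter (fun kv => PySem.Chars.isalpha kv.1)).map (fun kv => kv.2)).sum

def find_balanced_words_alt (words : List String) : List (String × Int) :=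
  (PySem.List.enumerate words).foldl (fun acc p =>
    let freq := pvFreqB (PySem.Chars.lower p.2.toList)
    if 2 * pvVowelTotalB freq = pvLetterTotalB freq then acc ++ [(p.2, p.1 + 1)] else acc) []

-- ===== PRECONDITION & SPEC =====
def Spec_find_balanced_words (words : List String) (out : List (String × Int)) : Prop := out = find_balanced_words_alt words
instance (words : List String) (out : List (String × Int)) : Decidable (Spec_find_balanced_words words out) := by unfold Spec_find_balanced_words; infer_instance

-- ===== CLAIM (what is proved, stated in full; the proofs are below) =====
def Claim_equal_find_balanced_words : Prop := ∀ (words : List String), Dom_find_balanced_words words → Spec_find_balanced_words words (find_balanced_words words)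

-- ===== LEMMAS AND PROOFS =====

-- every vowel is a letter
theorem pv_vowel_alpha (c : Char) (h : pvIsVowel c = true) :
    PySem.Chars.isalpha c = true := by
  simp [pvIsVowel] at h
  rcases h with rfl | rfl | rfl | rfl | rfl <;> decide

-- A's inner two-counter fold computes the two countP's
theorem pv_two_counter_loop (v a : Char → Bool) (cs : List Char) (x y : Int) :
    cs.foldl (fun vc c =>
      if v c then (vc.1 + 1, vc.2)
      else if a c then (vc.1, vc.2 + 1)
      else vc) (x, y) =
    (x + cs.countP v, y + cs.countP (fun c => a c && !v c)) := by
  induction cs generalizing x y with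
  | nil => simp
  | cons c cs ih =>
    cases hv : v c
    · cases ha : a c <;> simp [List.foldl_cons, hv, ha, ih] <;> omega
    · simp [List.foldl_cons, hv, ih]; omega

-- the letter count splits into vowels and non-vowel letters
theorem pv_countP_split (v a : Char → Bool) (h : ∀ c, v c = true → a c = true)
    (cs : List Char) :
    cs.countP a = cs.countP v + cs.countP (fun c => a c && !v c) := by
  induction cs with
  | nil => simp
  | cons c cs ih =>
    cases hv : v c
    · simp [List.countP_cons, hv, ih]
      omega
    · simp [hv, h c hv, ih]
      omega

-- summing cs.count over a duplicate-free key list counts the members of that list in cs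
theorem pv_sum_count_nodup (l cs : List Char) (hnd : l.Nodup) :
    (l.map (fun k => (cs.count k : Int))).sum
      = (cs.countP (fun x => decide (x ∈ l)) : Int) := by
  induction cs with
  | nil => simp
  | cons c cs ih =>
    have hstep : (l.map (fun k => ((c :: cs).count k : Int))).sum
        = (l.map (fun k => (cs.count k : Int))).sum
          + (l.map (fun k => if (k == c) = true then (1 : Int) else 0)).sum := by
      rw [← PySem.List.sum_map_add_int]
      apply congrArg
      apply List.map_congr_left
      intro k _
      rw [List.count_cons]
      push_cast
      split <;> simp_all [BEq.comm]
    have hone : (l.map (fun k => if (k == c) = true then (1 : Int) else 0)).sum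
        = if c ∈ l then (1 : Int) else 0 := by
      rw [PySem.List.sum_map_ite_one_zero (fun k => k == c) l]
      have hcount : l.countP (fun k => k == c) = l.count c := rfl
      rw [hcount]
      by_cases hc : c ∈ l
      · rw [List.count_eq_one_of_mem hnd hc]
        simp [hc]
      · rw [List.count_eq_zero_of_not_mem hc]
        simp [hc]
    rw [hstep, hone, ih, List.countP_cons]
    by_cases hc : c ∈ l <;> simp [hc]

-- B's vowel total over the frequency dict is the vowel countP
theorem pv_vowel_total (cs : List Char) :
    pvVowelTotalB (pvFreqB cs) = (cs.countP pvIsVowel : Int) := by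
  have hfreq : pvFreqB cs = PySem.Dict.counter cs :=
    PySem.Dict.foldl_insert_getD_add_one_eq_counter cs
  unfold pvVowelTotalB
  rw [hfreq]
  have h1 : (['a','e','i','o','u'].map (fun v => (PySem.Dict.counter cs).getD v 0)).sum
      = (['a','e','i','o','u'].map (fun k => (cs.count k : Int))).sum := by
    apply congrArg
    apply List.map_congr_left
    intro k _
    exact PySem.Dict.getD_counter cs k
  rw [h1, pv_sum_count_nodup _ cs (by decide)]
  apply congrArg
  apply List.countP_congr
  intro x _
  simp [pvIsVowel]

-- B's letter total over the frequency dict is the alphabetic countP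
theorem pv_letter_total (cs : List Char) :
    pvLetterTotalB (pvFreqB cs) = (cs.countP (fun c => PySem.Chars.isalpha c) : Int) := by
  have hfreq : pvFreqB cs = PySem.Dict.counter cs :=
    PySem.Dict.foldl_insert_getD_add_one_eq_counter cs
  unfold pvLetterTotalB
  rw [hfreq, PySem.Dict.items_counter, List.filter_map, List.map_map]
  have : ((PySem.Set.ofList cs).filter
        ((fun kv => PySem.Chars.isalpha kv.1) ∘ fun k => (k, (cs.count k : Int)))).map
        ((fun kv : Char × Int => kv.2) ∘ fun k => (k, (cs.count k : Int)))
      = ((PySem.Set.ofList cs).filter (fun c => PySem.Chars.isalpha c)).map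
          (fun k => (cs.count k : Int)) := by
    simp [Function.comp_def]
  rw [this,
    pv_sum_count_nodup _ cs ((PySem.Set.nodup_ofList cs).filter _)]
  apply congrArg
  apply List.countP_congr
  intro x hx
  simp [List.mem_filter, PySem.Set.mem_ofList, hx]

-- per-word: A's balance test agrees with B's
theorem pv_balanced_iff (cs : List Char) :
    ((pvCountsA cs).1 = (pvCountsA cs).2)
      ↔ 2 * pvVowelTotalB (pvFreqB cs) = pvLetterTotalB (pvFreqB cs) := by
  unfold pvCountsA
  rw [pv_two_counter_loop, pv_vowel_total, pv_letter_total,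
    pv_countP_split pvIsVowel (fun c => PySem.Chars.isalpha c) pv_vowel_alpha cs]
  simp
  omega

-- ===== VERDICT (by name: the statement is the Claim_ definition above) =====
theorem find_balanced_words_spec : Claim_equal_find_balanced_words := by
  intro words _
  show find_balanced_words words = find_balanced_words_alt words
  unfold find_balanced_words find_balanced_words_alt
  apply PySem.List.foldl_congr_mem
  intro acc p _
  by_cases h : (pvCountsA (PySem.Chars.lower p.2.toList)).1
      = (pvCountsA (PySem.Chars.lower p.2.toList)).2
  · have hb := (pv_balanced_iff (PySem.Chars.lower p.2.toList)).1 h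
    simp only [h, hb, if_true]
  · have hb : ¬ (2 * pvVowelTotalB (pvFreqB (PySem.Chars.lower p.2.toList))
        = pvLetterTotalB (pvFreqB (PySem.Chars.lower p.2.toList))) := fun hc =>
      h ((pv_balanced_iff _).2 hc)
    simp only [h, hb, if_false]
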